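-- pv_equiv track=rewrite | github.com/JadedBanana/CharlesBarkley | lib/commands/fun_interactive/hunger_games.py | generate_detect_dead
-- ===== SOURCE A (Python) =====
-- def generate_detect_dead(hg_dict):
--     """
--     Test for dead people.
--     """
--     everyone_dead = True
--     two_alive = False
--     for player in hg_dict['statuses']:
--         if not hg_dict['statuses'][player]['dead']:
--             if not everyone_dead:
--                 two_alive = True
--                 break
--             else:
--                 everyone_dead = False
--     return everyone_dead, two_alive
-- ===== SOURCE B (Python) =====
-- def generate_detect_dead(hg_dict):
--     """
--     Test for dead people.
--     """
--     statuses = hg_dict['statuses']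
--     alive = sum(1 for player in statuses if not statuses[player]['dead'])
--     return alive == 0, alive >= 2
-- ===== Notes on version B (the rewrite author's own statement) =====
-- stated objective: simpler
-- what changed: Replaces A's two-flag state machine with early break by a single aggregate pass that counts alive players and derives both booleans (alive == 0, alive >= 2) from the count.
import Mathlib
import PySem

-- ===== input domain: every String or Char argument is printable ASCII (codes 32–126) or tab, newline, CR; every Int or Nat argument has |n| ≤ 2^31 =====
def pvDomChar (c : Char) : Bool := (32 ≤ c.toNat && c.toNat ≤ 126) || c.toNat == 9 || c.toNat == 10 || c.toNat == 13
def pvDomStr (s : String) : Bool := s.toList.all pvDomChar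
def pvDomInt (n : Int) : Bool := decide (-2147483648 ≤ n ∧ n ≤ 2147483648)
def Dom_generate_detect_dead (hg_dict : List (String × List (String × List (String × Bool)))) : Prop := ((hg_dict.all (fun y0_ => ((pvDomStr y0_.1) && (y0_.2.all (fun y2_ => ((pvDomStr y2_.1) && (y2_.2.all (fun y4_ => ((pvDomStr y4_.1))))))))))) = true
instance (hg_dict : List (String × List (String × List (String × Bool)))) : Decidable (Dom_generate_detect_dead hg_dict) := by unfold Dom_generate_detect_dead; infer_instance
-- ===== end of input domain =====

-- B replaces A's two-flag state machine with early break by one alive-count pass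
-- deriving both booleans from the count (objective: simpler). Equivalence on Pre_.

-- ===== PORT A =====
-- A's loop: everyone_dead/two_alive flags, break as soon as a second alive player is found.
def generate_detect_dead_loop (sts : List (String × List (String × Bool)))
    (keys : List String) (everyone_dead two_alive : Bool) : Bool × Bool :=
  match keys with
  | [] => (everyone_dead, two_alive)
  | p :: rest =>
    if !((((sts.lookup p).getD []).lookup "dead").getD false) then
      if !everyone_dead then (everyone_dead, true)   -- two_alive = True; break
      else generate_detect_dead_loop sts rest false two_alive
    else generate_detect_dead_loop sts rest everyone_dead two_alive

def generate_detect_dead (hg_dict : List (String × List (String × List (String × Bool)))) : Bool × Bool :=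
  match hg_dict.lookup "statuses" with
  | none => (true, false)   -- KeyError in Python; excluded by Pre_
  | some sts => generate_detect_dead_loop sts (sts.map (·.1)) true false

-- ===== PORT B =====
def generate_detect_dead_alt (hg_dict : List (String × List (String × List (String × Bool)))) : Bool × Bool :=
  let sts := (hg_dict.lookup "statuses").getD []   -- KeyError in Python when absent; excluded by Pre_
  let alive := (sts.map (·.1)).countP (fun p => !((((sts.lookup p).getD []).lookup "dead").getD false))
  (alive == 0, decide (2 ≤ alive))

-- ===== PRECONDITION & SPEC =====
-- Pre_ requires a 'statuses' key and a 'dead' key in every player's status (KeyError otherwise).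
-- This is slightly stronger than A's exact returning set: A can break out early (two alive found)
-- before reaching a player whose status lacks 'dead'; B examines all players and raises there too.
def Pre_generate_detect_dead (hg_dict : List (String × List (String × List (String × Bool)))) : Prop :=
  (hg_dict.lookup "statuses").isSome = true ∧
  ∀ pr ∈ ((hg_dict.lookup "statuses").getD []),
    (((((hg_dict.lookup "statuses").getD []).lookup pr.1).getD []).lookup "dead").isSome = true
instance (hg_dict : List (String × List (String × List (String × Bool)))) : Decidable (Pre_generate_detect_dead hg_dict) := by unfold Pre_generate_detect_dead; infer_instance

def pvWitness_generate_detect_dead : (List (String × List (String × List (String × Bool)))) :=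
  [("statuses", [("a", [("dead", true)]), ("b", [("dead", false)])])]

def Spec_generate_detect_dead (hg_dict : List (String × List (String × List (String × Bool)))) (out : Bool × Bool) : Prop := out = generate_detect_dead_alt hg_dict
instance (hg_dict : List (String × List (String × List (String × Bool)))) (out : Bool × Bool) : Decidable (Spec_generate_detect_dead hg_dict out) := by unfold Spec_generate_detect_dead; infer_instance

-- ===== CLAIM (what is proved, stated in full; the proofs are below) =====
def Claim_equal_generate_detect_dead : Prop := ∀ (hg_dict : List (String × List (String × List (String × Bool)))), Dom_generate_detect_dead hg_dict → Pre_generate_detect_dead hg_dict → Spec_generate_detect_dead hg_dict (generate_detect_dead hg_dict)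

-- ===== LEMMAS AND PROOFS =====

-- After one alive player has been seen (everyone_dead = false, two_alive = false),
-- A's loop returns (false, "another alive player exists among the rest").
theorem loop_one_alive (sts : List (String × List (String × Bool))) (keys : List String) :
    generate_detect_dead_loop sts keys false false
      = (false, decide (1 ≤ keys.countP (fun p => !((((sts.lookup p).getD []).lookup "dead").getD false)))) := by
  induction keys with
  | nil => simp [generate_detect_dead_loop]
  | cons p rest ih =>
    simp only [generate_detect_dead_loop, List.countP_cons]
    by_cases h : (((sts.lookup p).getD []).lookup "dead").getD false
    · simp [h, ih]
    · simp [h]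

-- From the initial state, A's loop returns (count = 0, 2 ≤ count) of alive players.
theorem loop_count (sts : List (String × List (String × Bool))) (keys : List String) :
    generate_detect_dead_loop sts keys true false
      = (keys.countP (fun p => !((((sts.lookup p).getD []).lookup "dead").getD false)) == 0,
         decide (2 ≤ keys.countP (fun p => !((((sts.lookup p).getD []).lookup "dead").getD false)))) := by
  induction keys with
  | nil => simp [generate_detect_dead_loop]
  | cons p rest ih =>
    simp only [generate_detect_dead_loop, List.countP_cons]
    by_cases h : (((sts.lookup p).getD []).lookup "dead").getD false
    · simp [h, ih]
    · simp [h, loop_one_alive]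

-- ===== VERDICT (by name: the statement is the Claim_ definition above) =====
theorem generate_detect_dead_spec : Claim_equal_generate_detect_dead := by
  intro hg_dict _ hpre
  unfold Spec_generate_detect_dead generate_detect_dead generate_detect_dead_alt
  obtain ⟨h1, -⟩ := hpre
  obtain ⟨sts, hsts⟩ := Option.isSome_iff_exists.mp h1
  simp [hsts, loop_count]
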